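-- pv_equiv track=rewrite | github.com/os2datascanner/os2datascanner | src/os2datascanner/utils/ldap.py | ldap_escape
-- ===== SOURCE A (Python) =====
-- _scs = """ "#+,;<=>\\"""
--
-- def ldap_escape(s: str, codec: str = "utf-8"):
--     """Escapes a RDN fragment according to the rules laid out in RFC 4514.
--
--     By default, Unicode characters are converted to their representation in the
--     given codec and escaped as hex digits. To avoid this conversion, specify a
--     codec of None."""
--     v = ""
--     final = len(s) - 1
--     for position, c in enumerate(s):
--         if c in _scs:
--             # Spaces only need to be escaped at the beginning and at the end of
--             # each token; comments only need to be escaped at the beginning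
--             if ((c == "#" and position != 0)
--                     or (c == " " and position not in (0, final))):
--                 v += c
--             else:
--                 v += f"\\{c}"
--         elif codec is not None and ord(c) > 127:
--             v += "".join(f"\\{b:02x}" for b in c.encode(codec))
--         else:
--             v += c
--     return v
-- ===== SOURCE B (Python) =====
-- _always = '"+,;<=>\\'
--
-- def _esc(c, codec, extra):
--     if c in _always or c in extra:
--         return "\\" + c
--     if codec is not None and ord(c) > 127:
--         return "".join(f"\\{b:02x}" for b in c.encode(codec))
--     return c
--
-- def ldap_escape(s: str, codec: str = "utf-8"):
--     """RFC 4514 RDN escaping by zones: the head, middle and tail slices of the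
--     fragment are escaped by zone-specific rules (extra specials ' #', none,
--     ' '); no position counter or post-hoc patching."""
--     if not s:
--         return ""
--     if len(s) == 1:
--         return _esc(s[0], codec, " #")
--     return (_esc(s[0], codec, " #")
--             + "".join(_esc(c, codec, "") for c in s[1:-1])
--             + _esc(s[-1], codec, " "))
-- ===== Notes on version B (the rewrite author's own statement) =====
-- stated objective: simpler
-- what changed: A's enumerate loop with a position-dependent branch is replaced by slicing the input into head, middle and tail zones, each escaped by one zone-parameterised rule (the head zone additionally escapes space and hash, the tail zone additionally escapes space); no position counter and no patching of results.
import Mathlib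
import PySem

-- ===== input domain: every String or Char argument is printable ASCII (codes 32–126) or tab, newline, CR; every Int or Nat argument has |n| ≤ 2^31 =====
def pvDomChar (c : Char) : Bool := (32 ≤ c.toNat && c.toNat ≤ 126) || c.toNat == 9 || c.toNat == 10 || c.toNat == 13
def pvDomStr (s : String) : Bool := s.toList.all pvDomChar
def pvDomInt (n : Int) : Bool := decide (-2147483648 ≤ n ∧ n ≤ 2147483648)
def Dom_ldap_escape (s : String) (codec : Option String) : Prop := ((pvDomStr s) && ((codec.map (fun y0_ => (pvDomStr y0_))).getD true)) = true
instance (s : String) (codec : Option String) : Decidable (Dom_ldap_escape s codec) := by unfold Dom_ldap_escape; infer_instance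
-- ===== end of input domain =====

-- B replaces A's enumerate loop and its position-dependent branch by a three-zone split of
-- the input (head, middle slice, tail), each zone escaped by one parameterised rule; simpler.

-- ===== PORT A =====
-- shared hand-written port of  "".join(f"\\{b:02x}" for b in c.encode(codec))  (both Pythons
-- contain this very expression); exact for codec "utf-8" — on Dom all chars are ≤ 126, so
-- neither program ever reaches this branch.
def pvHexDigit (n : Nat) : Char := if n < 10 then Char.ofNat (48 + n) else Char.ofNat (87 + n)

def pvEncHex (c : Char) : String :=
  String.join (((String.singleton c).toUTF8.toList).map
    (fun b => "\\" ++ String.mk [pvHexDigit (b.toNat / 16), pvHexDigit (b.toNat % 16)]))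

-- _scs = """ "#+,;<=>\\"""
def pvScs : List Char := [' ', '"', '#', '+', ',', ';', '<', '=', '>', '\\']

-- the for-loop of A, position counter made explicit (enumerate)
def ldapLoopA (codec : Option String) (final : Int) : Nat → String → List Char → String
  | _, v, [] => v
  | pos, v, c :: rest =>
    let v :=
      if c ∈ pvScs then
        if (c = '#' ∧ (pos : Int) ≠ 0) ∨ (c = ' ' ∧ ¬((pos : Int) = 0 ∨ (pos : Int) = final)) then
          v ++ c.toString
        else
          v ++ "\\" ++ c.toString
      else if codec ≠ none ∧ c.toNat > 127 then
        v ++ pvEncHex c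
      else
        v ++ c.toString
    ldapLoopA codec final (pos + 1) v rest

def ldap_escape (s : String) (codec : Option String) : String :=
  ldapLoopA codec ((s.toList.length : Int) - 1) 0 "" s.toList

-- ===== PORT B =====
-- _always = '"+,;<=>\\'
def pvAlways : List Char := ['"', '+', ',', ';', '<', '=', '>', '\\']

-- _esc(c, codec, extra)
def pvEsc (codec : Option String) (extra : List Char) (c : Char) : String :=
  if c ∈ pvAlways ∨ c ∈ extra then "\\" ++ c.toString
  else if codec ≠ none ∧ c.toNat > 127 then pvEncHex c
  else c.toString

def ldap_escape_alt (s : String) (codec : Option String) : String :=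
  match s.toList with
  | [] => ""
  | [c] => pvEsc codec [' ', '#'] c
  | c :: d :: rest =>
    pvEsc codec [' ', '#'] c
      ++ String.join (((d :: rest).dropLast).map (pvEsc codec []))
      ++ pvEsc codec [' '] ((d :: rest).getLast (List.cons_ne_nil d rest))

-- ===== PRECONDITION & SPEC =====
def Spec_ldap_escape (s : String) (codec : Option String) (out : String) : Prop := out = ldap_escape_alt s codec
instance (s : String) (codec : Option String) (out : String) : Decidable (Spec_ldap_escape s codec out) := by unfold Spec_ldap_escape; infer_instance

-- ===== CLAIM (what is proved, stated in full; the proofs are below) =====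
def Claim_equal_ldap_escape : Prop := ∀ (s : String) (codec : Option String), Dom_ldap_escape s codec → Spec_ldap_escape s codec (ldap_escape s codec)

-- ===== LEMMAS AND PROOFS =====

theorem foldl_str (l : List String) : ∀ (a : String),
    List.foldl (fun r s => r ++ s) a l = a ++ List.foldl (fun r s => r ++ s) "" l := by
  induction l with
  | nil => intro a; simp
  | cons y ys ih => intro a; simp only [List.foldl_cons]; rw [ih (a ++ y), ih ("" ++ y)]; simp [String.append_assoc]

theorem join_cons (x : String) (l : List String) : String.join (x :: l) = x ++ String.join l := by
  simp [String.join, List.foldl_cons]; rw [foldl_str l x]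

theorem app_push (v t : String) (c : Char) : v ++ t.push c = (v ++ t).push c := by
  apply String.ext; simp

-- rendering of the tail (positions ≥ 1) of A's loop: only the very last space is escaped
def tailR (codec : Option String) : List Char → String
  | [] => ""
  | [c] => (if c = ' ' then "\\" else "") ++ pvEsc codec [] c
  | c :: d :: rest => pvEsc codec [] c ++ tailR codec (d :: rest)

theorem not_mem_always {c : Char} (h : c ∉ pvScs) : c ∉ pvAlways := by
  intro hm; apply h; simp [pvAlways] at hm; simp [pvScs]; tauto

theorem loop_tail (codec : Option String) (final : Int)
    (rest : List Char) : ∀ (k : Nat) (v : String), 1 ≤ k → (k : Int) + rest.length = final + 1 →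
    ldapLoopA codec final k v rest = v ++ tailR codec rest := by
  induction rest with
  | nil => intro k v hk he; simp [ldapLoopA, tailR]
  | cons c rest ih =>
    intro k v hk he
    have hk0 : (k : Int) ≠ 0 := by
      have : (1:Int) ≤ (k:Int) := by exact_mod_cast hk
      omega
    have hk0' : k ≠ 0 := by omega
    cases rest with
    | nil =>
      have hkf : (k : Int) = final := by
        simp only [List.length_cons, List.length_nil] at he; push_cast at he; omega
      have hf0 : final ≠ 0 := hkf ▸ hk0
      rw [ldapLoopA]
      simp only [ldapLoopA, tailR]
      by_cases hm : c ∈ pvScs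
      · simp only [pvScs, List.mem_cons, List.not_mem_nil, or_false] at hm
        rcases hm with rfl|rfl|rfl|rfl|rfl|rfl|rfl|rfl|rfl|rfl <;>
          simp [pvScs, pvEsc, pvAlways, hk0', hkf, hf0, app_push] <;>
          first | rfl | (apply String.ext; simp)
      · have ha := not_mem_always hm
        have hs : c ≠ ' ' := by rintro rfl; exact hm (by simp [pvScs])
        simp [pvEsc, hm, ha]
        split_ifs <;> first | rfl | (apply String.ext; simp)
    | cons d rest' =>
      have hkf : (k : Int) ≠ final := by
        simp only [List.length_cons] at he; push_cast at he; omega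
      rw [ldapLoopA]
      rw [ih (k + 1) _ (by omega)
        (by simp only [List.length_cons] at he ⊢; push_cast at he ⊢; omega)]
      rw [show tailR codec (c :: d :: rest') = pvEsc codec [] c ++ tailR codec (d :: rest') from rfl]
      rw [← String.append_assoc]
      congr 1
      by_cases hm : c ∈ pvScs
      · simp only [pvScs, List.mem_cons, List.not_mem_nil, or_false] at hm
        rcases hm with rfl|rfl|rfl|rfl|rfl|rfl|rfl|rfl|rfl|rfl <;>
          simp [pvScs, pvEsc, pvAlways, hk0, hk0', hkf, app_push] <;>
          first | rfl | (apply String.ext; simp)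
      · have ha := not_mem_always hm
        simp [pvEsc, hm, ha]
        split_ifs <;> first | rfl | (apply String.ext; simp)

-- the tail rendering is exactly B's middle-zone map followed by B's end-zone escape
theorem tailR_split (codec : Option String) : ∀ (d : Char) (rest : List Char),
    tailR codec (d :: rest) =
      String.join (((d :: rest).dropLast).map (pvEsc codec []))
        ++ pvEsc codec [' '] ((d :: rest).getLast (List.cons_ne_nil d rest)) := by
  intro d rest
  induction rest generalizing d with
  | nil =>
    show (if d = ' ' then "\\" else "") ++ pvEsc codec [] d = "" ++ pvEsc codec [' '] d
    by_cases hsp : d = ' '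
    · subst hsp; simp [pvEsc, pvAlways]
    · by_cases ha : d ∈ pvAlways
      · simp [pvEsc, ha, hsp]
      · simp [pvEsc, ha, hsp]
  | cons e rest' ih =>
    rw [show tailR codec (d :: e :: rest') = pvEsc codec [] d ++ tailR codec (e :: rest') from rfl,
        ih e]
    rw [show (d :: e :: rest').dropLast = d :: (e :: rest').dropLast from rfl]
    rw [List.map_cons, join_cons]
    rw [show (d :: e :: rest').getLast (List.cons_ne_nil d (e :: rest'))
        = (e :: rest').getLast (List.cons_ne_nil e rest') from List.getLast_cons _]
    simp [String.append_assoc]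

theorem main_eq (codec : Option String) (s : String) :
    ldap_escape s codec = ldap_escape_alt s codec := by
  unfold ldap_escape ldap_escape_alt
  generalize s.toList = cs
  cases cs with
  | nil => simp [ldapLoopA]
  | cons c rest =>
    cases rest with
    | nil =>
      by_cases hm : c ∈ pvScs
      · simp only [pvScs, List.mem_cons, List.not_mem_nil, or_false] at hm
        rcases hm with rfl|rfl|rfl|rfl|rfl|rfl|rfl|rfl|rfl|rfl <;>
          simp [ldapLoopA, pvScs, pvEsc, pvAlways, app_push] <;>
          first | rfl | (apply String.ext; simp)
      · have ha := not_mem_always hm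
        have hs : c ≠ ' ' := by rintro rfl; exact hm (by simp [pvScs])
        have hh : c ≠ '#' := by rintro rfl; exact hm (by simp [pvScs])
        simp [ldapLoopA, pvEsc, hm, ha, hs, hh]
        split_ifs <;> first | rfl | (apply String.ext; simp)
    | cons d rest' =>
      rw [ldapLoopA, loop_tail codec _ (d :: rest') 1 _ (le_refl 1)
            (by simp only [List.length_cons]; push_cast; omega), tailR_split]
      rw [← String.append_assoc]
      congr 1
      by_cases hm : c ∈ pvScs
      · simp only [pvScs, List.mem_cons, List.not_mem_nil, or_false] at hm
        rcases hm with rfl|rfl|rfl|rfl|rfl|rfl|rfl|rfl|rfl|rfl <;>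
          simp [pvScs, pvEsc, pvAlways, app_push] <;>
          first | rfl | (apply String.ext; simp)
      · have ha := not_mem_always hm
        have hs : c ≠ ' ' := by rintro rfl; exact hm (by simp [pvScs])
        have hh : c ≠ '#' := by rintro rfl; exact hm (by simp [pvScs])
        simp [pvEsc, hm, ha, hs, hh]
        split_ifs <;> first | rfl | (apply String.ext; simp)

-- ===== VERDICT (by name: the statement is the Claim_ definition above) =====
theorem ldap_escape_spec : Claim_equal_ldap_escape := by
  intro s codec _
  show ldap_escape s codec = ldap_escape_alt s codec
  exact main_eq codec s
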